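-- pv_equiv track=rewrite | github.com/marshallm94/Python_Practice | solutions/100_ds_problems_solutions.py | get_valid_passwords
-- ===== SOURCE A (Python) =====
-- def get_valid_passwords(possible_passwords):
--     digits = set([str(i) for i in range(10)])
--     special = set("^ ! # $ ? -".split())
--     out = []
--     dig_bool_cache = False
--     spec_bool_cache = False
--     for poss in possible_passwords:
--         for char in poss:
--             if char in digits:
--                 dig_bool_cache = True
--             if char in special:
--                 spec_bool_cache = True
--         if dig_bool_cache and spec_bool_cache:
--             out.append(poss)
--         dig_bool_cache = False
--         spec_bool_cache = False
--     return out
-- ===== SOURCE B (Python) =====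
-- def get_valid_passwords(possible_passwords):
--     digits = set("0123456789")
--     special = set("^!#$?-")
--     with_digit = {i for i, p in enumerate(possible_passwords) if not digits.isdisjoint(p)}
--     with_special = {i for i, p in enumerate(possible_passwords) if not special.isdisjoint(p)}
--     keep = with_digit & with_special
--     return [p for i, p in enumerate(possible_passwords) if i in keep]
-- ===== Notes on version B (the rewrite author's own statement) =====
-- stated objective: alternative
-- what changed: Replaces A's single flag-setting pass by a staged index-set algorithm: two enumerate passes build the sets of positions whose password contains a digit resp. a special character, the sets are intersected, and a final pass emits the passwords whose position is in the intersection.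
import Mathlib
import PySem

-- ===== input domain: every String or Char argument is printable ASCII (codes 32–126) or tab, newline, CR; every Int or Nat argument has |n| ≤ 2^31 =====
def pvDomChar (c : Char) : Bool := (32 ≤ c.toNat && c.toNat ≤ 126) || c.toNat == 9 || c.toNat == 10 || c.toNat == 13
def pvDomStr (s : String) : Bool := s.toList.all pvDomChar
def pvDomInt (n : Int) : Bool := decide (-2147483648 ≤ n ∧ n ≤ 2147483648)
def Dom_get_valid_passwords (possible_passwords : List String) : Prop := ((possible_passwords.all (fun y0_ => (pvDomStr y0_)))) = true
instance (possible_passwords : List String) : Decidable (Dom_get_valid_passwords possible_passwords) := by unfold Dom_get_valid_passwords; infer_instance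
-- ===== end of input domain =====

-- B replaces A's single pass with per-character boolean caches by a staged, index-set
-- algorithm: two enumerate passes build the sets of indices whose password meets each
-- requirement, the sets are intersected, and a final pass emits the passwords whose
-- index is in the intersection; same cost, different decomposition.

-- ===== PORT A =====
-- digits = set([str(i) for i in range(10)]); special = set("^ ! # $ ? -".split())
-- (1-character strings; iterating a Python string yields its characters, ported as Char)
def pvDigitsA : PySem.Set Char := PySem.Set.ofList ['0','1','2','3','4','5','6','7','8','9']
def pvSpecialA : PySem.Set Char := PySem.Set.ofList ['^','!','#','$','?','-']

-- the inner 'for char in poss' loop updating the two boolean caches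
def pvCharLoop : List Char → Bool × Bool → Bool × Bool
  | [], st => st
  | c :: cs, (d, s) =>
      pvCharLoop cs ((if PySem.Set.contains pvDigitsA c then true else d),
                     (if PySem.Set.contains pvSpecialA c then true else s))

-- one iteration of the outer 'for poss in possible_passwords' loop
def pvStep (acc : List String × Bool × Bool) (poss : String) : List String × Bool × Bool :=
  let (out, dig, spec) := acc
  let (dig', spec') := pvCharLoop poss.toList (dig, spec)
  ((if dig' && spec' then out ++ [poss] else out), false, false)

def get_valid_passwords (possible_passwords : List String) : List String :=
  (possible_passwords.foldl pvStep ([], false, false)).1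

-- ===== PORT B =====
-- digits = set("0123456789"); special = set("^!#$?-")
def pvDigB : PySem.Set Char := PySem.Set.ofList "0123456789".toList
def pvSpecB : PySem.Set Char := PySem.Set.ofList "^!#$?-".toList

-- {i for i, p in enumerate(possible_passwords) if not t.isdisjoint(p)}
def pvIdxWith (t : PySem.Set Char) (ps : List String) : PySem.Set Int :=
  PySem.Set.ofList (((PySem.List.enumerate ps).filter
    (fun ip => !(PySem.Set.isdisjoint t ip.2.toList))).map Prod.fst)

def get_valid_passwords_alt (possible_passwords : List String) : List String :=
  let keep := PySem.Set.inter (pvIdxWith pvDigB possible_passwords)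
                              (pvIdxWith pvSpecB possible_passwords)
  ((PySem.List.enumerate possible_passwords).filter
    (fun ip => PySem.Set.contains keep ip.1)).map Prod.snd

-- ===== PRECONDITION & SPEC =====
def Spec_get_valid_passwords (possible_passwords : List String) (out : List String) : Prop := out = get_valid_passwords_alt possible_passwords
instance (possible_passwords : List String) (out : List String) : Decidable (Spec_get_valid_passwords possible_passwords out) := by unfold Spec_get_valid_passwords; infer_instance

-- ===== CLAIM (what is proved, stated in full; the proofs are below) =====
def Claim_equal_get_valid_passwords : Prop := ∀ (possible_passwords : List String), Dom_get_valid_passwords possible_passwords → Spec_get_valid_passwords possible_passwords (get_valid_passwords possible_passwords)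

-- ===== LEMMAS AND PROOFS =====

-- the per-password predicate both programs decide
def pvGood (t : PySem.Set Char) (p : String) : Bool := !(PySem.Set.isdisjoint t p.toList)

-- A's inner char loop computes "old flag OR some char is a digit/special"
theorem pvCharLoop_eq (cs : List Char) (d s : Bool) :
    pvCharLoop cs (d, s) =
      (d || cs.any (fun c => PySem.Set.contains pvDigitsA c),
       s || cs.any (fun c => PySem.Set.contains pvSpecialA c)) := by
  induction cs generalizing d s with
  | nil => simp [pvCharLoop]
  | cons c cs ih =>
      simp only [pvCharLoop, ih, List.any_cons]
      by_cases h1 : PySem.Set.contains pvDigitsA c <;>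
        by_cases h2 : PySem.Set.contains pvSpecialA c <;>
          simp_all

-- non-disjointness with a character set ↔ some character is in it
theorem pvGood_eq_any (t : PySem.Set Char) (p : String) :
    pvGood t p = p.toList.any (fun c => PySem.Set.contains t c) := by
  rcases h : pvGood t p with _ | _
  · unfold pvGood at h
    simp only [Bool.not_eq_false'] at h
    have := (PySem.Set.isdisjoint_iff t p.toList).mp h
    symm
    simp only [List.any_eq_false]
    intro c hc hct
    exact this c ((PySem.Set.contains_iff _ _).mp hct) hc
  · unfold pvGood at h
    simp only [Bool.not_eq_eq_eq_not, Bool.not_true] at h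
    have : ¬ (∀ x ∈ t, x ∉ p.toList) := fun hall => by
      rw [← PySem.Set.isdisjoint_iff t p.toList] at hall; simp [hall] at h
    push Not at this
    obtain ⟨c, hct, hcp⟩ := this
    symm
    simp only [List.any_eq_true]
    exact ⟨c, hcp, (PySem.Set.contains_iff _ _).mpr hct⟩

-- A equals the filter by the character-wise predicate (over its own sets)
theorem pvStep_eq (out : List String) (poss : String) :
    pvStep (out, false, false) poss =
      ((if (poss.toList.any (fun c => PySem.Set.contains pvDigitsA c) &&
            poss.toList.any (fun c => PySem.Set.contains pvSpecialA c)) then out ++ [poss] else out),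
       false, false) := by
  simp [pvStep, pvCharLoop_eq]

theorem pvA_eq_filter (ps : List String) :
    get_valid_passwords ps = ps.filter (fun p => pvGood pvDigB p && pvGood pvSpecB p) := by
  have hd : pvDigitsA = pvDigB := by decide
  have hs : pvSpecialA = pvSpecB := by decide
  have key : ∀ (l out : List String),
      (l.foldl pvStep (out, false, false)).1 =
        out ++ l.filter (fun p => pvGood pvDigB p && pvGood pvSpecB p) := by
    intro l
    induction l with
    | nil => intro out; simp
    | cons p l ih =>
        intro out
        rw [List.foldl_cons, pvStep_eq, List.filter_cons]
        have hp : (p.toList.any (fun c => PySem.Set.contains pvDigitsA c) &&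
                   p.toList.any (fun c => PySem.Set.contains pvSpecialA c)) =
                  (pvGood pvDigB p && pvGood pvSpecB p) := by
          rw [pvGood_eq_any, pvGood_eq_any, hd, hs]
        rw [hp]
        split
        · rw [ih]; simp
        · rw [ih]
  exact key ps []

-- membership in an index set built by pvIdxWith
theorem pvMem_idxWith (t : PySem.Set Char) (ps : List String) (i : Int) :
    i ∈ pvIdxWith t ps ↔ ∃ (k : Nat) (h : k < ps.length), i = k ∧ pvGood t ps[k] = true := by
  unfold pvIdxWith
  rw [PySem.Set.mem_ofList]
  constructor
  · intro h
    obtain ⟨ip, hip, rfl⟩ := List.mem_map.mp h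
    obtain ⟨hmem, hpred⟩ := List.mem_filter.mp hip
    obtain ⟨k, hk, rfl⟩ := (PySem.List.mem_enumerate_iff _ _ _).mp hmem
    exact ⟨k, hk, by simp, hpred⟩
  · rintro ⟨k, hk, rfl, hgood⟩
    refine List.mem_map.mpr ⟨((k : Int), ps[k]), List.mem_filter.mpr ⟨?_, hgood⟩, rfl⟩
    exact (PySem.List.mem_enumerate_iff _ _ _).mpr ⟨k, hk, by simp⟩

-- the intersected index set decides exactly the per-password predicate at each index
theorem pvContains_keep (ps : List String) (k : Nat) (hk : k < ps.length) :
    PySem.Set.contains (PySem.Set.inter (pvIdxWith pvDigB ps) (pvIdxWith pvSpecB ps)) (k : Int) =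
      (pvGood pvDigB ps[k] && pvGood pvSpecB ps[k]) := by
  rcases hg : (pvGood pvDigB ps[k] && pvGood pvSpecB ps[k]) with _ | _
  · rw [Bool.and_eq_false_iff] at hg
    apply Bool.eq_false_iff.mpr
    intro hcon
    have hmem := (PySem.Set.contains_iff _ _).mp hcon
    rw [PySem.Set.mem_inter] at hmem
    obtain ⟨h1, h2⟩ := hmem
    obtain ⟨k1, hk1, he1, hg1⟩ := (pvMem_idxWith _ _ _).mp h1
    obtain ⟨k2, hk2, he2, hg2⟩ := (pvMem_idxWith _ _ _).mp h2
    have : k1 = k := by exact_mod_cast he1.symm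
    subst this
    have : k2 = k1 := by exact_mod_cast he2.symm
    subst this
    rcases hg with hg | hg <;> simp_all
  · rw [Bool.and_eq_true] at hg
    apply (PySem.Set.contains_iff _ _).mpr
    rw [PySem.Set.mem_inter]
    exact ⟨(pvMem_idxWith _ _ _).mpr ⟨k, hk, rfl, hg.1⟩,
           (pvMem_idxWith _ _ _).mpr ⟨k, hk, rfl, hg.2⟩⟩

-- filtering enumerate by an index predicate that agrees with g pointwise, then
-- projecting, is filtering the list by g
theorem pvEnumFilter (g : String → Bool) (f : Int → Bool) :
    ∀ (ps : List String) (s : Int),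
      (∀ (k : Nat) (h : k < ps.length), f (s + k) = g ps[k]) →
      ((PySem.List.enumerate ps s).filter (fun ip => f ip.1)).map Prod.snd = ps.filter g := by
  intro ps
  induction ps with
  | nil => intro s _; simp [PySem.List.enumerate_nil]
  | cons p l ih =>
      intro s hf
      rw [PySem.List.enumerate_cons, List.filter_cons, List.filter_cons]
      have h0 : f s = g p := by simpa using hf 0 (by simp)
      have hrest := ih (s + 1) (fun k hk => by
        have := hf (k + 1) (by simpa using Nat.succ_lt_succ hk)
        simpa [add_assoc, add_comm, add_left_comm] using this)
      simp only [h0]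
      split
      · simp [hrest]
      · exact hrest

-- ===== VERDICT (by name: the statement is the Claim_ definition above) =====
theorem get_valid_passwords_spec : Claim_equal_get_valid_passwords := by
  intro ps _
  show get_valid_passwords ps = get_valid_passwords_alt ps
  rw [pvA_eq_filter]
  unfold get_valid_passwords_alt
  symm
  exact pvEnumFilter _ _ ps 0 (fun k hk => by
    simpa using pvContains_keep ps k hk)
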